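-- pv_equiv track=rewrite | github.com/ayukyo/alltoolkit | Python/glob_pattern_utils/mod.py | expand_braces
-- ===== SOURCE A (Python) =====
-- from typing import List, Set, Tuple, Optional, Pattern
--
-- def expand_braces(pattern: str) -> List[str]:
--     """
--     Expand brace expressions in a glob pattern.
--
--     This returns all possible expansions of brace expressions without
--     performing matching.
--
--     Args:
--         pattern: The glob pattern with brace expressions
--
--     Returns:
--         List of expanded patterns
--
--     Example:
--         >>> expand_braces("file.{txt,py,md}")
--         ['file.txt', 'file.py', 'file.md']
--         >>> expand_braces("{a,b}{1,2}")
--         ['a1', 'a2', 'b1', 'b2']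
--     """
--     # Find all brace expressions
--     result = ['']
--     i = 0
--     n = len(pattern)
--
--     while i < n:
--         if pattern[i] == '{':
--             # Find the matching closing brace
--             depth = 1
--             start = i + 1
--             i += 1
--             while i < n and depth > 0:
--                 if pattern[i] == '{':
--                     depth += 1
--                 elif pattern[i] == '}':
--                     depth -= 1
--                 i += 1
--
--             # Parse alternatives
--             brace_content = pattern[start:i-1]
--             alternatives = _split_brace_alternatives(brace_content)
--
--             # Expand with existing results
--             new_result = []
--             for prefix in result:
--                 for alt in alternatives:
--                     new_result.append(prefix + alt)
--             result = new_result
--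
--         elif pattern[i] == '\\' and i + 1 < n:
--             # Escape character
--             for j in range(len(result)):
--                 result[j] += pattern[i + 1]
--             i += 2
--
--         else:
--             # Regular character
--             for j in range(len(result)):
--                 result[j] += pattern[i]
--             i += 1
--
--     return result
--
-- def _split_brace_alternatives(content: str) -> List[str]:
--     """Split brace content by commas, respecting nested braces."""
--     alternatives = []
--     current = []
--     depth = 0
--
--     for char in content:
--         if char == '{':
--             depth += 1
--             current.append(char)
--         elif char == '}':
--             depth -= 1
--             current.append(char)
--         elif char == ',' and depth == 0:
--             alternatives.append(''.join(current))
--             current = []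
--         else:
--             current.append(char)
--
--     if current:
--         alternatives.append(''.join(current))
--
--     return alternatives
-- ===== SOURCE B (Python) =====
-- from typing import List
--
--
-- def _split_brace_alternatives(content: str) -> List[str]:
--     """Split brace content by commas, respecting nested braces."""
--     alternatives = []
--     current = []
--     depth = 0
--     for char in content:
--         if char == '{':
--             depth += 1
--             current.append(char)
--         elif char == '}':
--             depth -= 1
--             current.append(char)
--         elif char == ',' and depth == 0:
--             alternatives.append(''.join(current))
--             current = []
--         else:
--             current.append(char)
--     if current:
--         alternatives.append(''.join(current))
--     return alternatives
--
--
-- def expand_braces(pattern: str) -> List[str]: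
--     """Expand brace expressions in a glob pattern (two-pass: tokenize, then combine)."""
--     # Pass 1: tokenize into segments; each segment is a list of alternatives.
--     segments = []
--     literal = []
--     i = 0
--     n = len(pattern)
--     while i < n:
--         c = pattern[i]
--         if c == '{':
--             depth = 1
--             start = i + 1
--             i += 1
--             while i < n and depth > 0:
--                 if pattern[i] == '{':
--                     depth += 1
--                 elif pattern[i] == '}':
--                     depth -= 1
--                 i += 1
--             if literal:
--                 segments.append([''.join(literal)])
--                 literal = []
--             segments.append(_split_brace_alternatives(pattern[start:i - 1]))
--         elif c == '\\' and i + 1 < n: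
--             literal.append(pattern[i + 1])
--             i += 2
--         else:
--             literal.append(c)
--             i += 1
--     if literal:
--         segments.append([''.join(literal)])
--     # Pass 2: left-to-right product of the segments.
--     result = ['']
--     for alts in segments:
--         result = [r + a for r in result for a in alts]
--     return result
-- ===== Notes on version B (the rewrite author's own statement) =====
-- stated objective: faster
-- what changed: A fuses scanning and expansion in one loop that re-appends every single character to every partial result string; B first tokenizes the pattern once into a flat list of segments (literal runs collapsed into single strings, braces into alternative lists) and then builds the output with one left-to-right product fold over the segments.
import Mathlib
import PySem

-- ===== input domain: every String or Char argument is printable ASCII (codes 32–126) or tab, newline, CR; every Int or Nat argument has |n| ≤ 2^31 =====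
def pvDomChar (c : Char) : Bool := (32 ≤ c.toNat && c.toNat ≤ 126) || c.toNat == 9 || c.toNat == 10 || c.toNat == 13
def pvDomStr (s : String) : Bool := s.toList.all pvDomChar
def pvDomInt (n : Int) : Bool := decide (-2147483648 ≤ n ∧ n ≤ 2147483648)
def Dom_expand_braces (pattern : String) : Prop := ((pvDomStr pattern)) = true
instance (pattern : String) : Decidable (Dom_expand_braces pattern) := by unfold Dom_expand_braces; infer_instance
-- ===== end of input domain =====

-- B re-decomposes A's single fused loop into two passes (tokenize into segments, then a product fold);
-- objective: faster (measured) — literal runs are no longer appended character-by-character to every partial result. Both sides share the brace scan and the alternative splitter.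

-- shared helper: the inner `while i < n and depth > 0` scan; returns (consumed chars, rest)
def pvScan : List Char → Int → List Char → (List Char × List Char)
  | cs, d, acc =>
    if d = 0 then (acc, cs)
    else match cs with
      | [] => (acc, [])
      | c :: cs' =>
        pvScan cs' (if c = '{' then d + 1 else if c = '}' then d - 1 else d) (acc ++ [c])
termination_by cs _ _ => cs.length

theorem pvScan_snd_length (cs : List Char) (d : Int) (acc : List Char) :
    (pvScan cs d acc).2.length ≤ cs.length := by
  induction cs generalizing d acc with
  | nil => rw [pvScan]; split <;> simp
  | cons c cs' ih =>
    rw [pvScan]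
    split
    · simp
    · exact le_trans (ih _ _) (by simp)

-- shared helper: _split_brace_alternatives (fold over the content with state (alternatives, current, depth))
def pvSplitAlts (content : List Char) : List String :=
  let s := content.foldl
    (fun (s : List String × List Char × Int) c =>
      if c = '{' then (s.1, s.2.1 ++ [c], s.2.2 + 1)
      else if c = '}' then (s.1, s.2.1 ++ [c], s.2.2 - 1)
      else if c = ',' ∧ s.2.2 = 0 then (s.1 ++ [String.ofList s.2.1], [], s.2.2)
      else (s.1, s.2.1 ++ [c], s.2.2))
    ([], [], 0)
  if s.2.1 ≠ [] then s.1 ++ [String.ofList s.2.1] else s.1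

-- ===== PORT A =====
-- new_result = []; for prefix in result: for alt in alternatives: new_result.append(prefix + alt)
def pvExpandStepA (res alts : List String) : List String :=
  res.foldl (fun nr p => alts.foldl (fun nr2 a => nr2 ++ [p ++ a]) nr) []

def pvLoopA : List Char → List String → List String
  | [], res => res
  | c :: cs, res =>
    if c = '{' then
      pvLoopA (pvScan cs 1 []).2 (pvExpandStepA res (pvSplitAlts (pvScan cs 1 []).1.dropLast))
    else
      match cs with
      | c2 :: cs' =>
        if c = '\\' then pvLoopA cs' (res.map (fun p => p ++ c2.toString))
        else pvLoopA (c2 :: cs') (res.map (fun p => p ++ c.toString))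
      | [] => res.map (fun p => p ++ c.toString)
termination_by cs _ => cs.length
decreasing_by
  · have := pvScan_snd_length cs 1 []; simp; omega
  · simp
  · simp

def expand_braces (pattern : String) : List String :=
  pvLoopA pattern.toList [""]

-- ===== PORT B =====
-- pass 1: tokenize into segments (state: pending literal chars, segments so far)
def pvTokenize : List Char → List Char → List (List String) → List (List String)
  | [], lit, segs => segs ++ (if lit ≠ [] then [[String.ofList lit]] else [])
  | c :: cs, lit, segs =>
    if c = '{' then
      pvTokenize (pvScan cs 1 []).2 []
        ((segs ++ (if lit ≠ [] then [[String.ofList lit]] else [])) ++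
          [pvSplitAlts (pvScan cs 1 []).1.dropLast])
    else
      match cs with
      | c2 :: cs' =>
        if c = '\\' then pvTokenize cs' (lit ++ [c2]) segs
        else pvTokenize (c2 :: cs') (lit ++ [c]) segs
      | [] => pvTokenize [] (lit ++ [c]) segs
termination_by cs _ _ => cs.length
decreasing_by
  · have := pvScan_snd_length cs 1 []; simp; omega
  · simp
  · simp
  · simp

-- pass 2: result = ['']; for alts in segments: result = [r + a for r in result for a in alts]
def expand_braces_alt (pattern : String) : List String :=
  (pvTokenize pattern.toList [] []).foldl
    (fun res alts => res.flatMap (fun r => alts.map (fun a => r ++ a))) [""]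

-- ===== PRECONDITION & SPEC =====
def Spec_expand_braces (pattern : String) (out : List String) : Prop := out = expand_braces_alt pattern
instance (pattern : String) (out : List String) : Decidable (Spec_expand_braces pattern out) := by unfold Spec_expand_braces; infer_instance

-- ===== CLAIM (what is proved, stated in full; the proofs are below) =====
def Claim_equal_expand_braces : Prop := ∀ (pattern : String), Dom_expand_braces pattern → Spec_expand_braces pattern (expand_braces pattern)

-- ===== LEMMAS AND PROOFS =====

def pvOpt (lit : List Char) : List (List String) :=
  if lit ≠ [] then [[String.ofList lit]] else []

def pvF (segs : List (List String)) : List String :=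
  segs.foldl (fun res alts => res.flatMap (fun r => alts.map (fun a => r ++ a))) [""]

theorem pvExpandStepA_eq (res alts : List String) :
    pvExpandStepA res alts = res.flatMap (fun r => alts.map (fun a => r ++ a)) := by
  unfold pvExpandStepA
  simp only [PySem.List.foldl_append_singleton_eq_map]
  exact Eq.symm List.flatMap_eq_foldl

theorem pvF_append_single (segs : List (List String)) (alts : List String) :
    pvF (segs ++ [alts]) = (pvF segs).flatMap (fun r => alts.map (fun a => r ++ a)) := by
  simp [pvF, List.foldl_append]

theorem pvF_opt (segs : List (List String)) (lit : List Char) :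
    (pvF segs).map (fun r => r ++ String.ofList lit) = pvF (segs ++ pvOpt lit) := by
  by_cases h : lit = []
  · subst h
    simp [pvOpt, String.append_empty]
  · rw [pvOpt, if_pos h, pvF_append_single]
    simp [← List.map_eq_flatMap]

theorem pvKey : ∀ (n : Nat) (cs : List Char), cs.length ≤ n → ∀ (lit : List Char) (segs : List (List String)),
    pvLoopA cs ((pvF segs).map (fun r => r ++ String.ofList lit)) = pvF (pvTokenize cs lit segs) := by
  intro n
  induction n with
  | zero =>
    intro cs hcs lit segs
    have : cs = [] := List.eq_nil_of_length_eq_zero (Nat.le_zero.mp hcs)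
    subst this
    rw [pvLoopA.eq_def, pvTokenize.eq_def]
    dsimp only
    rw [pvF_opt]
    rfl
  | succ n ih =>
    intro cs hcs lit segs
    match cs with
    | [] =>
      rw [pvLoopA.eq_def, pvTokenize.eq_def]
      dsimp only
      rw [pvF_opt]
      rfl
    | c :: cs =>
      rw [pvLoopA.eq_def, pvTokenize.eq_def]
      dsimp only
      by_cases hb : c = '{'
      · rw [if_pos hb, if_pos hb]
        have hstep : pvExpandStepA ((pvF segs).map (fun r => r ++ String.ofList lit))
            (pvSplitAlts (pvScan cs 1 []).1.dropLast)
            = pvF ((segs ++ pvOpt lit) ++ [pvSplitAlts (pvScan cs 1 []).1.dropLast]) := by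
          rw [pvExpandStepA_eq, pvF_opt, pvF_append_single]
        rw [hstep]
        have hlen : (pvScan cs 1 []).2.length ≤ n :=
          le_trans (pvScan_snd_length cs 1 []) (by simpa using Nat.le_of_succ_le_succ hcs)
        have := ih (pvScan cs 1 []).2 hlen [] ((segs ++ pvOpt lit) ++ [pvSplitAlts (pvScan cs 1 []).1.dropLast])
        rw [pvF_opt (segs := (segs ++ pvOpt lit) ++ [pvSplitAlts (pvScan cs 1 []).1.dropLast]) (lit := [])] at *
        simpa [pvOpt] using this
      · rw [if_neg hb, if_neg hb]
        match cs with
        | [] =>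
          rw [pvTokenize.eq_def]
          dsimp only
          have h1 : ((pvF segs).map (fun r => r ++ String.ofList lit)).map (fun p => p ++ c.toString)
              = (pvF segs).map (fun r => r ++ String.ofList (lit ++ [c])) := by
            rw [List.map_map]
            refine List.map_congr_left (fun r _ => ?_)
            rw [Function.comp_apply, String.ofList_append]
            exact String.append_assoc
          rw [h1, pvF_opt]
          simp [pvOpt]
        | c2 :: cs' =>
          dsimp only
          by_cases he : c = '\\'
          · rw [if_pos he, if_pos he]
            have h1 : ((pvF segs).map (fun r => r ++ String.ofList lit)).map (fun p => p ++ c2.toString)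
                = (pvF segs).map (fun r => r ++ String.ofList (lit ++ [c2])) := by
              rw [List.map_map]
              refine List.map_congr_left (fun r _ => ?_)
              rw [Function.comp_apply, String.ofList_append]
              exact String.append_assoc
            rw [h1]
            exact ih cs' (by simp at hcs; omega) (lit ++ [c2]) segs
          · rw [if_neg he, if_neg he]
            have h1 : ((pvF segs).map (fun r => r ++ String.ofList lit)).map (fun p => p ++ c.toString)
                = (pvF segs).map (fun r => r ++ String.ofList (lit ++ [c])) := by
              rw [List.map_map]
              refine List.map_congr_left (fun r _ => ?_)
              rw [Function.comp_apply, String.ofList_append]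
              exact String.append_assoc
            rw [h1]
            exact ih (c2 :: cs') (by simp at hcs ⊢; omega) (lit ++ [c]) segs


-- ===== VERDICT (by name: the statement is the Claim_ definition above) =====
theorem expand_braces_spec : Claim_equal_expand_braces := by
  intro pattern _
  unfold Spec_expand_braces expand_braces expand_braces_alt
  have h0 : ([""] : List String) = (pvF []).map (fun r => r ++ String.ofList []) := by
    simp [pvF]
  rw [h0, pvKey pattern.toList.length pattern.toList le_rfl [] []]
  rfl
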